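-- pv_equiv track=rewrite | github.com/JasmineZhangxyz/data-structs-and-algos | tsp/tsp.py | clean_up_memory
-- ===== SOURCE A (Python) =====
-- def clean_up_memory(a, m):
--     to_del = []
--     for key in a.keys():
--         if len(key) == m:
--             to_del.append(key)
--     for del_key in to_del:
--         del a[del_key]
--     return a
-- ===== SOURCE B (Python) =====
-- def clean_up_memory(a, m):
--     # Fixed-point loop: repeatedly scan for one key of length m, delete it,
--     # and restart the scan; stop when a full scan finds none.
--     while True:
--         for key in a:
--             if len(key) == m:
--                 del a[key]
--                 break
--         else:
--             return a
-- ===== Notes on version B (the rewrite author's own statement) =====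
-- stated objective: alternative
-- what changed: B replaces A's collect-keys-then-batch-delete pair of loops by a fixed-point loop that repeatedly scans the dict for a single offending key, deletes it and restarts, stopping when a scan finds none.
import Mathlib
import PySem

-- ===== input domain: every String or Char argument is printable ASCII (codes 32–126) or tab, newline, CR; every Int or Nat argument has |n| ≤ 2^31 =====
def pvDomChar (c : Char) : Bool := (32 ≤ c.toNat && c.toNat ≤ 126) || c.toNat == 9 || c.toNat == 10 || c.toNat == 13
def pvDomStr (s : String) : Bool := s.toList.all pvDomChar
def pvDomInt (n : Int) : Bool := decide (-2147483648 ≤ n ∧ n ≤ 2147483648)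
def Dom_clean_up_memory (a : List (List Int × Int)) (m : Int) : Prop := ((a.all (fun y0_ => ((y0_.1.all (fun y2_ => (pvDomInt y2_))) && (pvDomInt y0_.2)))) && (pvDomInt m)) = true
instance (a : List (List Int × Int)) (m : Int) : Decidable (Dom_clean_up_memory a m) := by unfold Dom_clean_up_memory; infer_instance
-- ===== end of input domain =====

-- B replaces A's collect-then-batch-delete pair of loops by a fixed-point loop deleting one
-- offending key per scan until none remains (objective: alternative, not faster). Both
-- Pythons mutate `a` in place and return it; the equivalence proved is about the returned value.

-- ===== PORT A =====
-- A: collect keys of length m into to_del, then delete each from the dict, return it.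
def clean_up_memory (a : List (List Int × Int)) (m : Int) : List (List Int × Int) :=
  let d := PySem.Dict.ofList a
  let to_del := d.keys.foldl
    (fun acc k => if ((k.length : Int) == m) then acc ++ [k] else acc) []
  let d2 := to_del.foldl (fun d' k => d'.erase k) d
  d2.items

-- ===== PORT B =====
-- B's while-True loop: scan for the first key of length m; if found delete it and
-- restart the scan, otherwise (the for-else branch) return the dict.
def cleanLoopB (m : Int) (d : PySem.Dict (List Int) Int) : List (List Int × Int) :=
  match h : d.keys.find? (fun k => (k.length : Int) == m) with
  | some k => cleanLoopB m (d.erase k)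
  | none => d.items
termination_by d.items.length
decreasing_by
  have hk : k ∈ d.keys := List.mem_of_find?_eq_some h
  obtain ⟨p, hp, hpk⟩ := List.mem_map.mp hk
  simp only [PySem.Dict.erase]
  exact List.length_filter_lt_length_iff_exists.mpr ⟨p, hp, by simp [hpk]⟩

def clean_up_memory_alt (a : List (List Int × Int)) (m : Int) : List (List Int × Int) :=
  cleanLoopB m (PySem.Dict.ofList a)

-- ===== PRECONDITION & SPEC =====
def Spec_clean_up_memory (a : List (List Int × Int)) (m : Int) (out : List (List Int × Int)) : Prop := out = clean_up_memory_alt a m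
instance (a : List (List Int × Int)) (m : Int) (out : List (List Int × Int)) : Decidable (Spec_clean_up_memory a m out) := by unfold Spec_clean_up_memory; infer_instance

-- ===== CLAIM (what is proved, stated in full; the proofs are below) =====
def Claim_equal_clean_up_memory : Prop := ∀ (a : List (List Int × Int)) (m : Int), Dom_clean_up_memory a m → Spec_clean_up_memory a m (clean_up_memory a m)

-- ===== LEMMAS AND PROOFS =====

-- B's fixed-point loop computes the length-≠-m filter of the items.
theorem cleanLoopB_eq_filter (m : Int) (d : PySem.Dict (List Int) Int) :
    cleanLoopB m d = d.items.filter (fun p => !((p.1.length : Int) == m)) := by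
  induction d using cleanLoopB.induct m with
  | case1 d k h ih =>
      rw [cleanLoopB]
      split
      · next k' h' =>
          rw [h'] at h; cases h
          rw [ih]
          simp only [PySem.Dict.erase, List.filter_filter]
          apply List.filter_congr
          intro p _
          have hkm := List.find?_some h'
          simp only [] at hkm
          rcases hpk : (p.1 == k) with _ | _
          · simp
          · have hpk' : p.1 = k := by simpa using hpk
            simp [hpk', hkm]
      · next h' => rw [h'] at h; cases h
  | case2 d h =>
      rw [cleanLoopB]
      split
      · next k' h' => rw [h'] at h; cases h
      · refine (List.filter_eq_self.mpr ?_).symm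
        intro p hp
        have hk : p.1 ∈ d.keys := List.mem_map_of_mem hp
        have := List.find?_eq_none.mp h p.1 hk
        simpa using this

-- Folding `erase` over a list of keys filters out every item whose key is in that list.
theorem foldl_erase_items {κ ν : Type} [BEq κ] (ks : List κ) (d : PySem.Dict κ ν) :
    (ks.foldl (fun d' k => d'.erase k) d).items
      = d.items.filter (fun p => ks.all (fun k => !(p.1 == k))) := by
  induction ks generalizing d with
  | nil => simp
  | cons k ks ih =>
      rw [List.foldl_cons, ih]
      simp only [PySem.Dict.erase, List.filter_filter, List.all_cons]
      apply List.filter_congr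
      intro p _
      simp [Bool.and_comm]

theorem clean_up_memory_spec : Claim_equal_clean_up_memory := by
  intro a m _
  unfold Spec_clean_up_memory clean_up_memory clean_up_memory_alt
  rw [cleanLoopB_eq_filter]
  simp only [PySem.List.foldl_append_if_eq_filter, List.nil_append, foldl_erase_items]
  apply List.filter_congr
  intro p hp
  have hk : p.1 ∈ (PySem.Dict.ofList a).keys := List.mem_map_of_mem hp
  rcases h : ((p.1.length : Int) == m) with _ | _
  · simp only [Bool.not_false]
    rw [List.all_eq_true]
    intro k hkmem
    have hkm := List.of_mem_filter hkmem
    simp only [Bool.not_eq_true', beq_eq_false_iff_ne]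
    intro hEq
    rw [hEq] at h
    simp [hkm] at h
  · simp only [Bool.not_true, List.all_eq_false]
    exact ⟨p.1, List.mem_filter.mpr ⟨hk, h⟩, by simp⟩
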